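-- pv_equiv track=rewrite | github.com/framazan/bwtandem | tests/test_ground_truth.py | canonical_motif
-- ===== SOURCE A (Python) =====
-- def canonical_motif(motif: str) -> str:
--     """Get canonical rotation of motif (smallest rotation, both strands)."""
--     motif = motif.upper()
--     if not motif:
--         return motif
--
--     # Reduce to primitive period first
--     motif = primitive_motif(motif)
--
--     # All rotations of forward strand
--     n = len(motif)
--     rotations = [motif[i:] + motif[:i] for i in range(n)]
--
--     # Reverse complement
--     comp = str.maketrans("ACGT", "TGCA")
--     rc = motif[::-1].translate(comp)
--     rc_rotations = [rc[i:] + rc[:i] for i in range(n)]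
--
--     all_rotations = rotations + rc_rotations
--     return min(all_rotations)
--
-- def primitive_motif(motif: str) -> str:
--     """Reduce motif to its primitive (shortest repeating) unit.
--     E.g., AGCAGC -> AGC, ATAT -> AT, AAAA -> A."""
--     n = len(motif)
--     for p in range(1, n + 1):
--         if n % p == 0:
--             unit = motif[:p]
--             if unit * (n // p) == motif:
--                 return unit
--     return motif
-- ===== SOURCE B (Python) =====
-- def canonical_motif(motif: str) -> str:
--     """Get canonical rotation of motif (smallest rotation, both strands)."""
--     s = motif.upper()
--     n = len(s)
--     if n == 0:
--         return s
--     # primitive period = first occurrence of s inside s+s after index 0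
--     p = (s + s).find(s, 1)
--     u = s[:p]
--     rc = "".join({"A": "T", "C": "G", "G": "C", "T": "A"}.get(c, c) for c in reversed(u))
--     # candidate-filtering selection of the smallest length-p window of w:
--     # rotations of u start at 0..p-1, rotations of rc start at 2p..3p-1
--     w = u + u + rc + rc
--     cand = list(range(p)) + list(range(2 * p, 3 * p))
--     k = 0
--     while k < p and len(cand) > 1:
--         c = min(w[i + k] for i in cand)
--         cand = [i for i in cand if w[i + k] == c]
--         k += 1
--     j = cand[0]
--     return w[j:j + p]
-- ===== Notes on version B (the rewrite author's own statement) =====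
-- stated objective: faster
-- what changed: B finds the primitive period as the first occurrence of s in s+s after index 0 instead of A's divisor-enumeration with a repetition check, and selects the smallest rotation by a candidate-filtering pass (keep, character position by character position, only the start indices in the doubled forward+reverse-complement string whose window still matches the running minimal prefix) instead of A's materialising all 2n full rotation strings and calling min() on them.
import Mathlib
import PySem

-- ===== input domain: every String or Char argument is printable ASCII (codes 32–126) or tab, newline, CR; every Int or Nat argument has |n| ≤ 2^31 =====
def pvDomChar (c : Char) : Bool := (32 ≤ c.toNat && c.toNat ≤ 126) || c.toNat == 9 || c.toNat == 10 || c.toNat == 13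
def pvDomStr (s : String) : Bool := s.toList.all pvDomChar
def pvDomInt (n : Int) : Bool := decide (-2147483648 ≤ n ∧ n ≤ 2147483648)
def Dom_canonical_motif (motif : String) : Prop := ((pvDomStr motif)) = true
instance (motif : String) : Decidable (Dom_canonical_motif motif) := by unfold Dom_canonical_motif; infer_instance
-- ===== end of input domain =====

-- B replaces A's "first divisor-period + repetition check, then min over two materialised
-- lists of rotation strings" by "primitive period via (s+s).find(s,1), then a candidate-set
-- filtering pass that keeps, position by position, only the start indices whose window still
-- matches the running minimal prefix" (alternative algorithm, same worst-case cost).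

-- ===== PORT A =====

-- str.maketrans("ACGT", "TGCA") applied by str.translate: per-character table, other chars unchanged (exact)
def pvCompA (c : Char) : Char :=
  if c = 'A' then 'T' else if c = 'C' then 'G' else if c = 'G' then 'C' else if c = 'T' then 'A' else c

-- Python 'unit * k' (string repetition)
def pvRepeat (u : List Char) : Nat → List Char
  | 0 => []
  | k + 1 => u ++ pvRepeat u k

-- primitive_motif's loop body: 'for p in range(1, n+1): if n % p == 0: unit = motif[:p]; if unit*(n//p) == motif: return unit'
-- (the loop variable p of range(1, n+1) takes exactly the natural values 1..n = List.range' 1 n)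
def pvPrimLoopA (s : List Char) (n : Nat) : List Nat → List Char
  | [] => s
  | p :: rest =>
    if n % p = 0 then
      if pvRepeat (PySem.List.slice s none (some (p : Int))) (n / p) = s then
        PySem.List.slice s none (some (p : Int))
      else pvPrimLoopA s n rest
    else pvPrimLoopA s n rest

-- motif[i:] + motif[:i]
def pvRotA (u : List Char) (i : Nat) : List Char :=
  PySem.List.slice u (some (i : Int)) none ++ PySem.List.slice u none (some (i : Int))

def canonical_motif (motif : String) : String :=
  let m := PySem.Str.upper motif
  let s := m.toList
  if s.length = 0 then m
  else
    let u := pvPrimLoopA s s.length (List.range' 1 s.length)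
    let n := u.length
    let rotations := (List.range n).map (pvRotA u)
    -- motif[::-1] is reverse (PySem.List.slice?_none_none_neg_one), then .translate(comp)
    let rc := u.reverse.map pvCompA
    let rcRotations := (List.range n).map (pvRotA rc)
    let allRotations := rotations ++ rcRotations
    -- min(all_rotations); the list is nonempty here, so Python's min returns
    String.ofList ((PySem.List.min? allRotations (fun x => x)).getD [])

-- ===== PORT B =====

-- the literal dict {"A":"T","C":"G","G":"C","T":"A"} with .get(c, c)
def pvCompB (c : Char) : Char :=
  PySem.Dict.getD (PySem.Dict.ofList [('A', 'T'), ('C', 'G'), ('G', 'C'), ('T', 'A')]) c c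

-- 'while k < p and len(cand) > 1: c = min(w[i+k] for i in cand); cand = [i for i in cand if w[i+k] == c]; k += 1'
-- fuel = p - k makes 'k < p' the fuel test; w[i+k] is always in range here (i + p ≤ len w, k < p), so getD is exact
def pvFilterLoop (w : List Char) : Nat → Nat → List Nat → List Nat
  | 0, _, cand => cand
  | fuel + 1, k, cand =>
    if cand.length > 1 then
      let c := (PySem.List.min? (cand.map (fun i => w.getD (i + k) 'A')) (fun x => x)).getD 'A'
      pvFilterLoop w fuel (k + 1) (cand.filter (fun i => w.getD (i + k) 'A' == c))
    else cand

def canonical_motif_alt (motif : String) : String :=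
  let s := (PySem.Str.upper motif).toList
  let n := s.length
  if n = 0 then PySem.Str.upper motif
  else
    -- p = (s + s).find(s, 1): always ≥ 1 here (s occurs at index n), so toNat is exact
    let p := (PySem.Chars.findFrom (s ++ s) s ((1 : Nat) : Int) none).toNat
    let u := PySem.List.slice s none (some (p : Int))
    let rc := u.reverse.map pvCompB
    let w := u ++ u ++ rc ++ rc
    let cand := List.range p ++ List.range' (2 * p) p
    let res := pvFilterLoop w p 0 cand
    -- cand[0]: res is proved nonempty below, so Python's cand[0] returns its head
    let j := res.headD 0
    String.ofList (PySem.List.slice w (some (j : Int)) (some ((j : Int) + (p : Int))))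

-- ===== PRECONDITION & SPEC =====
def Spec_canonical_motif (motif : String) (out : String) : Prop := out = canonical_motif_alt motif
instance (motif : String) (out : String) : Decidable (Spec_canonical_motif motif out) := by unfold Spec_canonical_motif; infer_instance

-- ===== CLAIM (what is proved, stated in full; the proofs are below) =====
def Claim_equal_canonical_motif : Prop := ∀ (motif : String), Dom_canonical_motif motif → Spec_canonical_motif motif (canonical_motif motif)

-- ===== LEMMAS AND PROOFS =====

theorem comp_agree (c : Char) : pvCompB c = pvCompA c := by
  unfold pvCompA pvCompB
  by_cases h1 : c = 'A'
  · subst h1; decide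
  by_cases h2 : c = 'C'
  · subst h2; decide
  by_cases h3 : c = 'G'
  · subst h3; decide
  by_cases h4 : c = 'T'
  · subst h4; decide
  rw [show (PySem.Dict.ofList [('A', 'T'), ('C', 'G'), ('G', 'C'), ('T', 'A')]) =
      PySem.Dict.mk [('A', 'T'), ('C', 'G'), ('G', 'C'), ('T', 'A')] from by decide]
  have e1 : ('A' == c) = false := beq_eq_false_iff_ne.mpr (Ne.symm h1)
  have e2 : ('C' == c) = false := beq_eq_false_iff_ne.mpr (Ne.symm h2)
  have e3 : ('G' == c) = false := beq_eq_false_iff_ne.mpr (Ne.symm h3)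
  have e4 : ('T' == c) = false := beq_eq_false_iff_ne.mpr (Ne.symm h4)
  simp [PySem.Dict.getD, PySem.Dict.get?, List.find?, e1, e2, e3, e4, h1, h2, h3, h4]

theorem pvRepeat_succ_right (u : List Char) (k : Nat) :
    pvRepeat u (k + 1) = pvRepeat u k ++ u := by
  induction k with
  | zero => simp [pvRepeat]
  | succ k ih =>
    show u ++ pvRepeat u (k + 1) = pvRepeat u (k + 1) ++ u
    conv_lhs => rw [ih]
    rw [← List.append_assoc]
    rfl

theorem length_pvRepeat (u : List Char) (k : Nat) : (pvRepeat u k).length = k * u.length := by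
  induction k with
  | zero => simp [pvRepeat]
  | succ k ih =>
    show (u ++ pvRepeat u k).length = (k + 1) * u.length
    simp [ih, Nat.succ_mul]
    ring

-- commuting strings: if t ++ u = u ++ t and |t| = k·|u| then t = u^k
theorem comm_repeat (u : List Char) : ∀ (k : Nat) (t : List Char),
    t ++ u = u ++ t → t.length = k * u.length → t = pvRepeat u k := by
  intro k
  induction k with
  | zero => intro t _ hl; simpa [pvRepeat] using List.eq_nil_of_length_eq_zero (by simpa using hl)
  | succ k ih =>
    intro t hc hl
    rcases Nat.eq_zero_or_pos u.length with hu | hu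
    · have ht0 : t.length = 0 := by rw [hl, hu]; ring
      have ht : t = [] := List.eq_nil_of_length_eq_zero ht0
      have hu' : u = [] := List.eq_nil_of_length_eq_zero hu
      subst ht; subst hu'
      symm
      exact (List.eq_nil_of_length_eq_zero (by rw [length_pvRepeat]; simp))
    · have hul : u.length ≤ t.length := by
        rw [hl]
        calc u.length = 1 * u.length := (one_mul _).symm
          _ ≤ (k + 1) * u.length := Nat.mul_le_mul_right _ (by omega)
      have htake : t.take u.length = u := by
        have h1 := congrArg (List.take u.length) hc
        rw [List.take_append, List.take_append, Nat.sub_eq_zero_of_le hul, List.take_zero,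
          List.append_nil, List.take_length, Nat.sub_self, List.take_zero, List.append_nil] at h1
        exact h1
      set t' := t.drop u.length with ht'
      have hts : t = u ++ t' := by rw [← htake, ht', List.take_append_drop]
      have hc' : t' ++ u = u ++ t' := by
        have h2 : u ++ (t' ++ u) = u ++ (u ++ t') := by
          have h3 := hc
          rw [hts] at h3
          simpa [List.append_assoc] using h3
        exact List.append_cancel_left h2
      have hl' : t'.length = k * u.length := by
        have h4 : t.length = k * u.length + u.length := by rw [hl]; ring
        have h5 : t'.length = t.length - u.length := by simp [ht']
        omega
      rw [hts, ih t' hc' hl']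
      rfl

-- rotate-fix at p, with p ∣ n, is exactly the repetition condition A tests
theorem fix_iff_repeat (s : List Char) (p : Nat) (hp : 0 < p) (hpn : p ≤ s.length)
    (hdvd : p ∣ s.length) :
    (s.drop p ++ s.take p = s) ↔ pvRepeat (s.take p) (s.length / p) = s := by
  obtain ⟨k, hk⟩ := hdvd
  have hk1 : 0 < k := by
    rcases Nat.eq_zero_or_pos k with h | h
    · subst h; rw [Nat.mul_zero] at hk; omega
    · exact h
  obtain ⟨j, rfl⟩ : ∃ j, k = j + 1 := ⟨k - 1, by omega⟩
  have hdiv : s.length / p = j + 1 := by rw [hk]; exact Nat.mul_div_cancel_left _ hp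
  have htlen : (s.take p).length = p := by simp; omega
  rw [hdiv]
  constructor
  · intro hfix
    have hcomm : s.drop p ++ s.take p = s.take p ++ s.drop p := by
      rw [hfix, List.take_append_drop]
    have hdlen : (s.drop p).length = j * (s.take p).length := by
      rw [htlen]
      have h6 : (s.drop p).length = s.length - p := by simp
      rw [h6, hk, Nat.mul_succ, Nat.mul_comm]
      exact Nat.add_sub_cancel _ _
    have hrep := comm_repeat (s.take p) j (s.drop p) hcomm hdlen
    conv_rhs => rw [← List.take_append_drop p s]
    rw [show pvRepeat (s.take p) (j + 1) = s.take p ++ pvRepeat (s.take p) j from rfl, hrep]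
  · intro hrep
    have hs : s = s.take p ++ pvRepeat (s.take p) j := by
      conv_lhs => rw [← hrep]
      rfl
    have hdrop : s.drop p = pvRepeat (s.take p) j := by
      conv_lhs => rw [hs]
      rw [List.drop_append, htlen, Nat.sub_self, List.drop_zero,
        List.drop_eq_nil_of_le (by rw [htlen]), List.nil_append]
    rw [hdrop, ← pvRepeat_succ_right, hrep]

-- the minimal positive rotation period divides the length
theorem min_period_dvd (s : List Char) (m : Nat) (hm : 0 < m) (hms : s.rotate m = s)
    (hmin : ∀ r, 0 < r → r < m → s.rotate r ≠ s) : m ∣ s.length := by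
  have hmul : ∀ j : Nat, s.rotate (m * j) = s := by
    intro j
    induction j with
    | zero => simp
    | succ j ih => rw [Nat.mul_succ, ← List.rotate_rotate, ih, hms]
  have hn : s.rotate s.length = s := List.rotate_length s
  have hr : s.rotate (s.length % m) = s := by
    have h7 : s.length = m * (s.length / m) + s.length % m := (Nat.div_add_mod _ _).symm
    calc s.rotate (s.length % m) = (s.rotate (m * (s.length / m))).rotate (s.length % m) := by
          rw [hmul]
      _ = s.rotate (m * (s.length / m) + s.length % m) := List.rotate_rotate _ _ _
      _ = s.rotate s.length := by rw [← h7]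
      _ = s := hn
  rcases Nat.eq_zero_or_pos (s.length % m) with h | h
  · exact Nat.dvd_of_mod_eq_zero h
  · exact absurd hr (hmin _ h (Nat.mod_lt _ hm))

-- slices with natural bounds
theorem slice_from' (s : List Char) (q : Nat) :
    PySem.List.slice s (some (q : Int)) none = s.drop q := PySem.List.slice_from_natCast s q
theorem slice_to' (s : List Char) (q : Nat) :
    PySem.List.slice s none (some (q : Int)) = s.take q := PySem.List.slice_to_natCast s q

-- A's scan returns take m for the minimal rotation period m
theorem primLoopA_eq (s : List Char) (m : Nat) (hm : 0 < m) (hmn : m ≤ s.length)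
    (hmfix : s.drop m ++ s.take m = s)
    (hmin : ∀ r, 0 < r → r < m → ¬ (s.drop r ++ s.take r = s)) :
    ∀ (k a : Nat), 0 < a → a ≤ m → m < a + k →
      pvPrimLoopA s s.length (List.range' a k) = s.take m := by
  have hdvd : m ∣ s.length := by
    apply min_period_dvd s m hm
    · exact (List.rotate_eq_drop_append_take hmn).trans hmfix
    · intro r hr hrm hrot
      exact hmin r hr hrm ((List.rotate_eq_drop_append_take (by omega)).symm.trans hrot)
  have hmod : s.length % m = 0 := by
    obtain ⟨c, hc⟩ := hdvd
    rw [hc]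
    exact Nat.mul_mod_right m c
  intro k
  induction k with
  | zero => intro a _ h1 h2; omega
  | succ k ih =>
    intro a ha ham hak
    rw [List.range'_succ, pvPrimLoopA, slice_to']
    by_cases hda : s.length % a = 0
    · have hadvd : a ∣ s.length := Nat.dvd_of_mod_eq_zero hda
      have han : a ≤ s.length := Nat.le_of_dvd (by omega) hadvd
      by_cases hrep : pvRepeat (s.take a) (s.length / a) = s
      · have hfa : s.drop a ++ s.take a = s := (fix_iff_repeat s a ha han hadvd).mpr hrep
        have h10 : ¬ a < m := fun h => hmin a ha h hfa
        have heq : a = m := by omega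
        subst heq
        rw [if_pos hda, if_pos hrep]
      · have hne : a ≠ m := by
          intro h
          exact hrep (h ▸ (fix_iff_repeat s m hm hmn hdvd).mp hmfix)
        simp only [hda, if_true, hrep, if_false]
        exact ih (a + 1) (by omega) (by omega) (by omega)
    · have hne : a ≠ m := by
        intro h; rw [h] at hda; exact hda hmod
      simp only [hda, if_false]
      exact ih (a + 1) (by omega) (by omega) (by omega)

-- A's rotation builder as drop/take
theorem rotA_eq (u : List Char) : pvRotA u = fun i => u.drop i ++ u.take i := by
  funext i
  rw [pvRotA, slice_from', slice_to']

-- the length-|u| window of u++u at i ≤ |u| is the i-th rotation of u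
theorem window_rot (u : List Char) (i : Nat) (hi : i ≤ u.length) :
    ((u ++ u).drop i).take u.length = u.drop i ++ u.take i := by
  rw [List.drop_append, Nat.sub_eq_zero_of_le hi, List.drop_zero, List.take_append,
    List.take_of_length_le (by simp)]
  congr 1
  have h : u.length - (List.drop i u).length = i := by simp; omega
  rw [h]

-- window length
theorem window_len (w : List Char) (p i : Nat) (h : i + p ≤ w.length) :
    ((w.drop i).take p).length = p := by
  simp [List.length_take, List.length_drop]
  omega

-- the k-th character of the window at i is w[i+k]
theorem window_get? (w : List Char) (p i k : Nat) (h : i + p ≤ w.length) (hk : k < p) :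
    ((w.drop i).take p)[k]? = some (w.getD (i + k) 'A') := by
  rw [List.getElem?_take_of_lt hk, List.getElem?_drop,
    List.getD_eq_getElem?_getD, List.getElem?_eq_getElem (by omega)]
  simp

-- extend a window prefix by one character
theorem window_take_succ (w : List Char) (p i k : Nat) (h : i + p ≤ w.length) (hk : k < p) :
    ((w.drop i).take p).take (k + 1) =
      ((w.drop i).take p).take k ++ [w.getD (i + k) 'A'] := by
  rw [List.take_add_one, window_get? w p i k h hk]
  rfl

-- lexicographic: equal k-prefixes and a smaller k-th character give a smaller list
theorem lt_of_prefix_lt : ∀ (k : Nat) (x y : List Char), x.take k = y.take k →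
    ∀ (cx cy : Char), x[k]? = some cx → y[k]? = some cy → cx < cy → x < y := by
  intro k
  induction k with
  | zero =>
    intro x y _ cx cy hx hy hlt
    cases x with
    | nil => simp at hx
    | cons a as =>
      cases y with
      | nil => simp at hy
      | cons b bs =>
        simp at hx hy
        rw [List.cons_lt_cons_iff]
        exact Or.inl (hx ▸ hy ▸ hlt)
  | succ k ih =>
    intro x y htake cx cy hx hy hlt
    cases x with
    | nil => simp at hx
    | cons a as =>
      cases y with
      | nil => simp at hy
      | cons b bs =>
        simp [List.take_succ_cons] at htake
        rw [List.cons_lt_cons_iff]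
        right
        exact ⟨htake.1, ih as bs htake.2 cx cy (by simpa using hx) (by simpa using hy) hlt⟩

-- Python min over a nonempty list of strings, instance-adjusted to the order the ports use
theorem min?_id_cons' (x : List Char) (t : List (List Char)) :
    (PySem.List.min? (x :: t) fun y => y) = some (List.foldl min x t) := by
  have h := PySem.List.min?_id_cons (κ := List Char) x t
  convert h using 2

-- Python min over a nonempty list is the least element claimed
theorem min?_eq_of_isMin (xs : List (List Char)) (v : List Char)
    (hmem : v ∈ xs) (hle : ∀ y ∈ xs, v ≤ y) :
    PySem.List.min? xs (fun y => y) = some v := by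
  cases xs with
  | nil => simp at hmem
  | cons x t =>
    rw [min?_id_cons']
    congr 1
    have hmle := PySem.List.foldl_min_le t x
    have hmmem := PySem.List.foldl_min_mem t x
    apply le_antisymm
    · rcases List.mem_cons.mp hmem with h | h
      · rw [h]; exact hmle.1
      · exact hmle.2 v h
    · rcases hmmem with h | h
      · rw [h]; exact hle x (List.mem_cons_self ..)
      · exact hle _ (List.mem_cons_of_mem _ h)

-- the filtering loop: from candidates sharing their k-prefix it returns a nonempty subset
-- whose windows are ≤ the window of every input candidate
theorem filterLoop_spec (w : List Char) (p : Nat) :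
    ∀ (fuel k : Nat) (cand : List Nat), k + fuel = p → cand ≠ [] →
      (∀ i ∈ cand, i + p ≤ w.length) →
      (∀ i ∈ cand, ∀ j ∈ cand, ((w.drop i).take p).take k = ((w.drop j).take p).take k) →
      pvFilterLoop w fuel k cand ≠ [] ∧
      (∀ j ∈ pvFilterLoop w fuel k cand, j ∈ cand) ∧
      (∀ j ∈ pvFilterLoop w fuel k cand, ∀ i ∈ cand,
        (w.drop j).take p ≤ (w.drop i).take p) := by
  intro fuel
  induction fuel with
  | zero =>
    intro k cand hk hne hbnd hpre
    refine ⟨hne, fun j hj => hj, fun j hj i hi => ?_⟩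
    have hkp : k = p := by omega
    have h := hpre j hj i hi
    rw [hkp, List.take_of_length_le (le_of_eq (window_len w p j (hbnd j hj))),
      List.take_of_length_le (le_of_eq (window_len w p i (hbnd i hi)))] at h
    exact le_of_eq h
  | succ fuel ih =>
    intro k cand hk hne hbnd hpre
    rw [pvFilterLoop]
    by_cases hlen : cand.length > 1
    · rw [if_pos hlen]
      have hkp : k < p := by omega
      cases cand with
      | nil => exact absurd rfl hne
      | cons a t =>
        dsimp only
        have hcval : (PySem.List.min? (((a :: t).map (fun i => w.getD (i + k) 'A'))) (fun x => x)).getD 'A'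
            = (t.map (fun i => w.getD (i + k) 'A')).foldl min (w.getD (a + k) 'A') := by
          rw [List.map_cons, PySem.List.min?_id_cons, Option.getD_some]
        rw [hcval]
        set f : Nat → Char := fun i => w.getD (i + k) 'A' with hf
        set c : Char := (t.map f).foldl min (f a) with hc
        have hcmem : ∃ i ∈ a :: t, f i = c := by
          rcases PySem.List.foldl_min_mem (t.map f) (f a) with h | h
          · exact ⟨a, List.mem_cons_self .., by rw [hc, h]⟩
          · obtain ⟨i, hi, hfi⟩ := List.mem_map.mp h
            exact ⟨i, List.mem_cons_of_mem _ hi, by rw [hc, ← hfi]⟩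
        have hcle : ∀ i ∈ a :: t, c ≤ f i := by
          intro i hi
          rcases List.mem_cons.mp hi with h | h
          · rw [h, hc]; exact (PySem.List.foldl_min_le (t.map f) (f a)).1
          · rw [hc]
            exact (PySem.List.foldl_min_le (t.map f) (f a)).2 (f i) (List.mem_map_of_mem h)
        set cand' := (a :: t).filter (fun i => f i == c) with hcand'
        obtain ⟨i0, hi0mem, hi0c⟩ := hcmem
        have hi0' : i0 ∈ cand' := List.mem_filter.mpr ⟨hi0mem, beq_iff_eq.mpr hi0c⟩
        have hne' : cand' ≠ [] := List.ne_nil_of_mem hi0'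
        have hsub' : ∀ i ∈ cand', i ∈ a :: t := fun i hi => List.mem_of_mem_filter hi
        have hbnd' : ∀ i ∈ cand', i + p ≤ w.length := fun i hi => hbnd i (hsub' i hi)
        have hfc : ∀ i ∈ cand', f i = c := fun i hi =>
          beq_iff_eq.mp (List.mem_filter.mp hi).2
        have hpre' : ∀ i ∈ cand', ∀ j ∈ cand',
            ((w.drop i).take p).take (k + 1) = ((w.drop j).take p).take (k + 1) := by
          intro i hi j hj
          rw [window_take_succ w p i k (hbnd' i hi) hkp,
            window_take_succ w p j k (hbnd' j hj) hkp,
            hpre i (hsub' i hi) j (hsub' j hj)]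
          have hch : w.getD (i + k) 'A' = w.getD (j + k) 'A' := by
            rw [show w.getD (i + k) 'A' = f i from rfl, show w.getD (j + k) 'A' = f j from rfl,
              hfc i hi, hfc j hj]
          rw [hch]
        obtain ⟨rne, rsub, rle⟩ := ih (k + 1) cand' (by omega) hne' hbnd' hpre'
        refine ⟨rne, fun j hj => hsub' j (rsub j hj), fun j hj i hi => ?_⟩
        by_cases hic : f i = c
        · exact rle j hj i (List.mem_filter.mpr ⟨hi, beq_iff_eq.mpr hic⟩)
        · -- i was filtered out now: its k-th character is strictly larger
          have hj' : j ∈ cand' := rsub j hj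
          have hjc : f j = c := hfc j hj'
          have hclt : c < f i := lt_of_le_of_ne (hcle i hi) (fun h => hic h.symm)
          apply le_of_lt
          apply lt_of_prefix_lt k _ _ (hpre j (hsub' j hj') i hi) (f j) (f i)
          · rw [window_get? w p j k (hbnd j (hsub' j hj')) hkp, hf]
          · rw [window_get? w p i k (hbnd i hi) hkp, hf]
          · rw [hjc]; exact hclt
    · rw [if_neg hlen]
      refine ⟨hne, fun j hj => hj, fun j hj i hi => ?_⟩
      cases cand with
      | nil => exact absurd rfl hne
      | cons a t =>
        have ht : t = [] := by
          cases t with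
          | nil => rfl
          | cons b tb => simp at hlen
        subst ht
        have h1 : j = a := by simpa using hj
        have h2 : i = a := by simpa using hi
        rw [h1, h2]

-- (s+s).find(s, 1) is the minimal rotation period
theorem findFrom_eq_min_period (s : List Char) (m : Nat) (hn : 0 < s.length)
    (hm : 0 < m) (hmn : m ≤ s.length) (hmfix : s.drop m ++ s.take m = s)
    (hmin : ∀ r, 0 < r → r < m → ¬ (s.drop r ++ s.take r = s)) :
    PySem.Chars.findFrom (s ++ s) s ((1 : Nat) : Int) none = (m : Int) := by
  have hk1 : 1 ≤ (s ++ s).length := by simp; omega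
  -- s occurs in (s++s) after index 0 (at index |s|), so find does not return -1
  have hocc : ∀ q : Nat, q ≤ s.length → (s <+: (s ++ s).drop q ↔ s.drop q ++ s.take q = s) := by
    intro q hq
    constructor
    · intro hpre
      have h := List.prefix_iff_eq_take.mp hpre
      rw [window_rot s q hq] at h
      exact h.symm
    · intro hfix
      apply List.prefix_iff_eq_take.mpr
      rw [window_rot s q hq, hfix]
  have hne : PySem.Chars.findFrom (s ++ s) s ((1 : Nat) : Int) none ≠ -1 := by
    rw [Ne, PySem.Chars.findFrom_natCast_eq_neg_one_iff (s ++ s) s 1 hk1]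
    rw [not_not]
    -- s is an infix of (s++s).drop 1: hmfix gives a prefix occurrence at m ≥ 1
    have h := (hocc m hmn).mpr hmfix
    have hd : (s ++ s).drop m = ((s ++ s).drop 1).drop (m - 1) := by
      rw [List.drop_drop]; congr 1; omega
    rw [hd] at h
    exact h.isInfix.trans (List.drop_suffix _ _).isInfix
  obtain ⟨hge, hpre, hminq⟩ := PySem.Chars.findFrom_natCast_spec (s ++ s) s 1 hk1 hne
  set F := PySem.Chars.findFrom (s ++ s) s ((1 : Nat) : Int) none with hF
  have hF0 : 0 ≤ F := le_trans (by norm_num) hge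
  set q := F.toNat with hq
  have hq1 : 1 ≤ q := by omega
  have hqn : q ≤ s.length := by
    have hl := hpre.length_le
    simp at hl
    omega
  have hqfix : s.drop q ++ s.take q = s := (hocc q hqn).mp hpre
  have hqm : ¬ m < q := by
    intro hlt
    exact (hminq m (by omega) (by omega)) ((hocc m hmn).mpr hmfix)
  have hmq : ¬ q < m := fun hlt => hmin q hq1 hlt hqfix
  have : q = m := by omega
  omega

-- ===== VERDICT (by name: the statement is the Claim_ definition above) =====
theorem canonical_motif_spec : Claim_equal_canonical_motif := by
  intro motif _
  unfold Spec_canonical_motif canonical_motif canonical_motif_alt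
  set s := (PySem.Str.upper motif).toList with hs
  by_cases hlen : s.length = 0
  · rw [if_pos hlen, if_pos hlen]
  · rw [if_neg hlen, if_neg hlen]
    have hn1 : 1 ≤ s.length := by omega
    have hex : ∃ q, 0 < q ∧ (s.drop q ++ s.take q = s) :=
      ⟨s.length, by omega, by simp⟩
    set m := Nat.find hex with hmdef
    obtain ⟨hm, hmfix⟩ := Nat.find_spec hex
    have hmin : ∀ r, 0 < r → r < m → ¬ (s.drop r ++ s.take r = s) := by
      intro r hr hrm hfix
      exact Nat.find_min hex hrm ⟨hr, hfix⟩
    have hmn : m ≤ s.length := Nat.find_min' hex ⟨by omega, by simp⟩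
    have hA : pvPrimLoopA s s.length (List.range' 1 s.length) = s.take m :=
      primLoopA_eq s m hm hmn hmfix hmin s.length 1 (by omega) (by omega) (by omega)
    have hB : (PySem.Chars.findFrom (s ++ s) s ((1 : Nat) : Int) none).toNat = m := by
      rw [findFrom_eq_min_period s m (by omega) hm hmn hmfix hmin]
      simp
    dsimp only
    rw [hA, hB, slice_to']
    have hul : (s.take m).length = m := by rw [List.length_take]; omega
    set u := s.take m with hu
    rw [show pvCompB = pvCompA from funext comp_agree]
    set rc := u.reverse.map pvCompA with hrc
    have hrcl : rc.length = m := by simp [hrc, hul]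
    set w := u ++ u ++ rc ++ rc with hw
    have hwassoc : w = (u ++ u) ++ (rc ++ rc) := by simp [hw, List.append_assoc]
    have hwlen : w.length = 4 * m := by simp [hw, hul, hrcl]; omega
    set cand := List.range m ++ List.range' (2 * m) m with hcand
    have hbnd : ∀ i ∈ cand, i + m ≤ w.length := by
      intro i hi
      rw [hwlen]
      rcases List.mem_append.mp hi with h | h
      · have := List.mem_range.mp h; omega
      · have := List.mem_range'_1.mp h; omega
    have hcne : cand ≠ [] :=
      List.ne_nil_of_mem (List.mem_append.mpr (Or.inl (List.mem_range.mpr hm)))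
    obtain ⟨rne, rsub, rle⟩ := filterLoop_spec w m m 0 cand (by omega) hcne hbnd
      (fun i _ j _ => by simp)
    set res := pvFilterLoop w m 0 cand with hres
    have hjmem : res.headD 0 ∈ res := by
      rcases List.exists_cons_of_ne_nil rne with ⟨a, t, he⟩
      rw [he]
      exact List.mem_cons_self ..
    set j := res.headD 0 with hj
    have hjcand : j ∈ cand := rsub j hjmem
    -- the windows of w at the candidate starts are exactly A's rotation lists
    have hwin1 : ∀ i ∈ List.range m, (w.drop i).take m = pvRotA u i := by
      intro i hi
      have him : i ≤ m := le_of_lt (List.mem_range.mp hi)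
      rw [rotA_eq, hwassoc, List.drop_append, Nat.sub_eq_zero_of_le (by simp [hul]; omega),
        List.drop_zero, List.take_append, Nat.sub_eq_zero_of_le (by simp [hul]; omega),
        List.take_zero, List.append_nil]
      have := window_rot u i (by omega)
      rw [hul] at this
      exact this
    have hwin2 : ∀ i ∈ List.range m, (w.drop (2 * m + i)).take m = pvRotA rc i := by
      intro i hi
      have him : i ≤ m := le_of_lt (List.mem_range.mp hi)
      rw [rotA_eq, hwassoc, List.drop_append,
        List.drop_eq_nil_of_le (by simp [hul]; omega), List.nil_append,
        show 2 * m + i - (u ++ u).length = i from by simp [hul]; omega]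
      have := window_rot rc i (by omega)
      rw [hrcl] at this
      exact this
    have hmap : cand.map (fun i => (w.drop i).take m) =
        (List.range m).map (pvRotA u) ++ (List.range m).map (pvRotA rc) := by
      rw [hcand, List.map_append]
      congr 1
      · exact List.map_congr_left hwin1
      · rw [List.range'_eq_map_range, List.map_map]
        exact List.map_congr_left (fun i hi => hwin2 i hi)
    have hvmem : (w.drop j).take m ∈
        (List.range m).map (pvRotA u) ++ (List.range m).map (pvRotA rc) := by
      rw [← hmap]
      exact List.mem_map_of_mem hjcand
    have hvlb : ∀ y ∈ (List.range m).map (pvRotA u) ++ (List.range m).map (pvRotA rc),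
        (w.drop j).take m ≤ y := by
      intro y hy
      rw [← hmap] at hy
      obtain ⟨i, hi, hiy⟩ := List.mem_map.mp hy
      rw [← hiy]
      exact rle j hjmem i hi
    rw [hul]
    rw [min?_eq_of_isMin _ _ hvmem hvlb, Option.getD_some]
    congr 1
    rw [show ((j : Int) + (m : Int)) = (((j + m : Nat) : Int)) from by push_cast; ring]
    rw [PySem.List.slice_toNat w (a := ((j : Nat) : Int)) (b := (((j + m : Nat) : Int)))
      (by exact_mod_cast Nat.zero_le _) (by exact_mod_cast Nat.zero_le _)]
    simp only [Int.toNat_natCast]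
    rw [Nat.add_sub_cancel_left]
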